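-- pv_equiv track=rewrite | github.com/i-redbyte/leetcode | easy/1-bit and 2-bit characters/solution.py | isOneBitCharacter1
-- ===== SOURCE A (Python) =====
-- from typing import List
--
-- def isOneBitCharacter1(bits: List[int]) -> bool:
--     i = 0
--     n = len(bits)
--     while i < n - 1:
--         if bits[i] == 1:
--             i += 2
--         else:
--             i += 1
--     return i == n - 1
-- ===== SOURCE B (Python) =====
-- from typing import List
--
-- def isOneBitCharacter1(bits: List[int]) -> bool:
--     if not bits:
--         return False
--     ones = 0
--     for b in reversed(bits[:-1]):
--         if b != 1:
--             break
--         ones += 1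
--     return ones % 2 == 0
-- ===== Notes on version B (the rewrite author's own statement) =====
-- stated objective: alternative
-- what changed: Replaces the forward pointer walk over the whole list with a single backward scan that counts the trailing run of ones before the last element and decides by that count's parity (even = one-bit character), returning False on the empty list as A does.
import Mathlib
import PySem

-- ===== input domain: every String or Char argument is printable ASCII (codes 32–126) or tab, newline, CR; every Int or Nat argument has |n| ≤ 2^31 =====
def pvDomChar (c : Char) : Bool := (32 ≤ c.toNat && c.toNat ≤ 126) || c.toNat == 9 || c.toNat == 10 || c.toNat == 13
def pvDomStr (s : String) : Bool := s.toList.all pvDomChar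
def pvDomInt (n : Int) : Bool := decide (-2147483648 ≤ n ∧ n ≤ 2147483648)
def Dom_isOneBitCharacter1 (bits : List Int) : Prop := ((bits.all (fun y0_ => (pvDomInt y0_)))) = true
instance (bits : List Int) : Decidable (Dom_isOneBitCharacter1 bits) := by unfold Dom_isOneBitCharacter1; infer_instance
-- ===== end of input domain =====

-- B replaces A's forward two-step pointer walk by a backward scan: it counts the
-- trailing run of ones before the last element and decides by the parity of that count.

-- ===== PORT A =====
-- the while loop of A: state is the index i; steps by 2 on a 1, else by 1
def loopA (bits : List Int) (n i : Int) : Int :=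
  if _h : i < n - 1 then
    if PySem.List.pyGet? bits i = some 1 then loopA bits n (i + 2) else loopA bits n (i + 1)
  else i
termination_by (n - 1 - i).toNat
decreasing_by all_goals omega

def isOneBitCharacter1 (bits : List Int) : Bool :=
  let n : Int := bits.length
  decide (loopA bits n 0 = n - 1)

-- ===== PORT B =====
-- counts the leading 1s of its argument; B applies it to reversed(bits[:-1])
def leadOnes : List Int → Nat
  | [] => 0
  | b :: r => if b = 1 then leadOnes r + 1 else 0

def isOneBitCharacter1_alt (bits : List Int) : Bool :=
  match bits with
  | [] => false
  | _ => decide (leadOnes bits.dropLast.reverse % 2 = 0)  -- bits[:-1] ported as dropLast (exact)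

-- ===== PRECONDITION & SPEC =====
def Spec_isOneBitCharacter1 (bits : List Int) (out : Bool) : Prop := out = isOneBitCharacter1_alt bits
instance (bits : List Int) (out : Bool) : Decidable (Spec_isOneBitCharacter1 bits out) := by unfold Spec_isOneBitCharacter1; infer_instance

-- ===== CLAIM (what is proved, stated in full; the proofs are below) =====
def Claim_equal_isOneBitCharacter1 : Prop := ∀ (bits : List Int), Dom_isOneBitCharacter1 bits → Spec_isOneBitCharacter1 bits (isOneBitCharacter1 bits)

-- ===== LEMMAS AND PROOFS =====

-- A's loop as structural recursion on the suffix of the list not yet visited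
def hA : List Int → Bool
  | [] => false
  | [_] => true
  | b :: x :: r => if b = 1 then hA r else hA (x :: r)

-- trailing-ones count of l (leadOnes of the reverse), as a convenient abbreviation
def tOnes (l : List Int) : Nat := leadOnes l.reverse

theorem leadOnes_le (l : List Int) : leadOnes l ≤ l.length := by
  induction l with
  | nil => simp [leadOnes]
  | cons b r ih => simp only [leadOnes, List.length_cons]; split <;> omega

theorem leadOnes_append_singleton (u : List Int) (b : Int) :
    leadOnes (u ++ [b]) =
      if leadOnes u = u.length then (if b = 1 then u.length + 1 else u.length)
      else leadOnes u := by
  induction u with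
  | nil => simp [leadOnes]
  | cons a r ih =>
    have hle := leadOnes_le r
    simp only [List.cons_append, leadOnes, List.length_cons, ih]
    split_ifs <;> omega

theorem leadOnes_rev_cons (b : Int) (l : List Int) :
    leadOnes (b :: l).reverse =
      if leadOnes l.reverse = l.length then (if b = 1 then l.length + 1 else l.length)
      else leadOnes l.reverse := by
  have h1 : (b :: l).reverse = l.reverse ++ [b] := by simp
  rw [h1, leadOnes_append_singleton, List.length_reverse]

theorem tOnes_cons_ne (b : Int) (l : List Int) (hb : b ≠ 1) : tOnes (b :: l) = tOnes l := by
  simp only [tOnes, leadOnes_rev_cons]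
  split_ifs <;> simp_all

theorem tOnes_cons_cons_parity (x : Int) (l : List Int) :
    tOnes (1 :: x :: l) % 2 = tOnes l % 2 := by
  have hle := leadOnes_le l.reverse
  have hlen : l.reverse.length = l.length := l.length_reverse
  have h3 : leadOnes l.reverse ≠ l.length + 1 := by omega
  rw [tOnes, tOnes, leadOnes_rev_cons 1 (x :: l), leadOnes_rev_cons x l]
  simp only [List.length_cons]
  by_cases h1 : leadOnes l.reverse = l.length <;> by_cases h2 : x = 1 <;>
    simp [h1, h2, h3] <;> omega

theorem hA_eq_parity (s : List Int) :
    hA s = (decide (s ≠ []) && decide (tOnes s.dropLast % 2 = 0)) := by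
  fun_induction hA s with
  | case1 => simp
  | case2 x => simp [tOnes, leadOnes]
  | case3 x r ih =>
    match r with
    | [] => simp [hA, tOnes, leadOnes]
    | y :: r' =>
      have hd : (1 :: x :: y :: r').dropLast = 1 :: x :: (y :: r').dropLast := by simp
      simp only [hd, tOnes_cons_cons_parity, ih]
      simp
  | case4 b x r hb ih =>
    have hd : (b :: x :: r).dropLast = b :: (x :: r).dropLast := by simp
    simp only [hd, tOnes_cons_ne b _ hb, ih]
    simp

theorem pyGet?_drop_head (bits : List Int) (i : Int) (b : Int) (rest : List Int)
    (hi : 0 ≤ i) (hdrop : bits.drop i.toNat = b :: rest) :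
    PySem.List.pyGet? bits i = some b := by
  rw [PySem.List.pyGet?_of_nonneg bits hi]
  have h0 : (List.drop i.toNat bits)[0]? = bits[i.toNat + 0]? := List.getElem?_drop
  rw [hdrop] at h0
  simpa using h0.symm

theorem loopA_eq_hA (bits : List Int) (i : Int) (hi : 0 ≤ i) :
    decide (loopA bits bits.length i = (bits.length : Int) - 1) = hA (bits.drop i.toNat) := by
  generalize hs : bits.drop i.toNat = s
  induction s using hA.induct generalizing i with
  | case1 =>
    -- suffix empty: i ≥ length, loop stops at i ≠ length - 1
    have hlen : (bits.length : Int) ≤ i := by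
      have := List.drop_eq_nil_iff.mp hs
      omega
    rw [loopA]
    simp only [hA]
    have hni : ¬ (i < (bits.length : Int) - 1) := by omega
    simp only [hni, dite_false]
    simp
    omega
  | case2 x =>
    -- suffix has one element: i = length - 1, loop stops returning i
    have h1 : bits.length - i.toNat = 1 := by
      have := congrArg List.length hs
      simp at this
      omega
    have hlt : i.toNat < bits.length := by omega
    have hieq : i = (bits.length : Int) - 1 := by omega
    rw [loopA]
    simp only [hA]
    have hni : ¬ (i < (bits.length : Int) - 1) := by omega
    simp only [hni, dite_false]
    simp [hieq]
  | case3 x r ih =>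
    have hlen : i.toNat + 2 ≤ bits.length := by
      have := congrArg List.length hs
      simp at this
      omega
    have hlt : i < (bits.length : Int) - 1 := by omega
    have hget := pyGet?_drop_head bits i 1 (x :: r) hi hs
    rw [loopA]
    simp only [hlt, dite_true, hget, if_true]
    have hdrop2 : bits.drop (i + 2).toNat = r := by
      have h2 : (i + 2).toNat = i.toNat + 2 := by omega
      rw [h2, ← List.drop_drop, hs]
      rfl
    have := ih (i + 2) (by omega) hdrop2
    simpa [hA] using this
  | case4 b x r hb ih =>
    have hlen : i.toNat + 2 ≤ bits.length := by
      have := congrArg List.length hs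
      simp at this
      omega
    have hlt : i < (bits.length : Int) - 1 := by omega
    have hget := pyGet?_drop_head bits i b (x :: r) hi hs
    have hne : ¬ (PySem.List.pyGet? bits i = some 1) := by
      rw [hget]; simp [hb]
    rw [loopA]
    simp only [dif_pos hlt, hne, if_false]
    have hdrop1 : bits.drop (i + 1).toNat = x :: r := by
      have h2 : (i + 1).toNat = i.toNat + 1 := by omega
      rw [h2, ← List.drop_drop, hs]
      rfl
    have := ih (i + 1) (by omega) hdrop1
    simpa [hA, hb] using this

-- ===== VERDICT (by name: the statement is the Claim_ definition above) =====
theorem isOneBitCharacter1_spec : Claim_equal_isOneBitCharacter1 := by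
  intro bits _
  unfold Spec_isOneBitCharacter1 isOneBitCharacter1
  have h0 : bits.drop (0 : Int).toNat = bits := by simp
  have := loopA_eq_hA bits 0 (by omega)
  rw [h0] at this
  rw [this, hA_eq_parity]
  match bits with
  | [] => simp [isOneBitCharacter1_alt]
  | b :: r => simp [isOneBitCharacter1_alt, tOnes]
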